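-- pv_equiv track=rewrite | github.com/C0jae/Coding-Pratice | bin/Programmers/P26_더맵게.py | solution2
-- ===== SOURCE A (Python) =====
-- def solution2(scoville, k):
--     answer = 0
--
--     while True:
--         # scoville 리스트 오름차순 정렬
--         scoville.sort()
--
--         # 해당 리스트의 길이가 1이면서 k보다 작으면 answer = -1 설정 및 break
--         if (len(scoville) == 1 and scoville[0] < k):
--             answer = -1
--             break
--
--         # 첫번째 수가(가장 작은 수) k 이상일 경우 break
--         elif (scoville[0] >= k):
--             break
--
--         # k보다 적은 맵기가 있을경우 제시된 방법 진행 및 answer + 1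
--         else:
--             scoville.append(scoville[0] + (scoville[1] * 2))
--             for i in range(2):
--                 scoville.pop(0)
--
--             answer += 1
--
--     return answer
--
-- scoville = [1, 2, 3, 9, 10, 12]
--
-- k = 7
-- ===== SOURCE B (Python) =====
-- def _insert_sorted(x, ys):
--     # ys is sorted ascending; place x after any elements equal to it
--     i = 0
--     while i < len(ys) and ys[i] <= x:
--         i += 1
--     return ys[:i] + [x] + ys[i:]
--
--
-- def solution2(scoville, k):
--     s = sorted(scoville)
--     count = 0
--     while s[0] < k:
--         if len(s) == 1:
--             return -1
--         s = _insert_sorted(s[0] + 2 * s[1], s[2:])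
--         count += 1
--     return count
-- ===== Notes on version B (the rewrite author's own statement) =====
-- stated objective: alternative
-- what changed: B sorts the list once and then maintains sortedness by ordered insertion of each combined value, instead of A's re-sorting the whole list and popping the front twice on every iteration.
-- outside the precondition, e.g. on solution2([], 7): A raises IndexError, B raises IndexError
import Mathlib
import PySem

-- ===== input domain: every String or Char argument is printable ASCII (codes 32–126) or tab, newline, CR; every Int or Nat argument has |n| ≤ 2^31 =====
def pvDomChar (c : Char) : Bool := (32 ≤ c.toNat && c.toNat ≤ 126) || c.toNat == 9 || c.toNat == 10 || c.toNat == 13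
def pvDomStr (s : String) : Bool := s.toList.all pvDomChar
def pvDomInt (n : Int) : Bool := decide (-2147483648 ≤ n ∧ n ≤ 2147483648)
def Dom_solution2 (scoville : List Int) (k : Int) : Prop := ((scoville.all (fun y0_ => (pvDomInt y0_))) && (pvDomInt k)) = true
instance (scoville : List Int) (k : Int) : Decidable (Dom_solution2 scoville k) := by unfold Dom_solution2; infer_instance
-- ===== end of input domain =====

-- B replaces A's re-sort-every-iteration loop by a single initial sort plus ordered
-- insertion of each combined value (alternative decomposition; return value only:
-- A sorts/pops its argument in place, B does not mutate it).

-- ===== PORT A =====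
-- A's while-loop as recursion; each pass sorts, checks the two exit conditions,
-- otherwise appends s[0] + s[1]*2 and pops the front twice.  The 't = []' guard
-- only makes the recursion total: Python raises IndexError there (outside Pre_).
def solution2Loop (s : List Int) (k : Int) (answer : Int) : Int :=
  let t := PySem.List.sorted s (fun x => x) false
  if _h0 : t = [] then 0
  else if _h1 : t.length = 1 ∧ PySem.List.pyGetD t 0 0 < k then -1
  else if _h2 : PySem.List.pyGetD t 0 0 ≥ k then answer
  else
    solution2Loop (((t ++ [PySem.List.pyGetD t 0 0 + PySem.List.pyGetD t 1 0 * 2]).tail).tail) k (answer + 1)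
termination_by s.length
decreasing_by
  have hl : t.length = s.length := PySem.List.length_sorted s (fun x => x) false
  have h2 : 2 ≤ t.length := by
    rcases t with _ | ⟨a, _ | ⟨b, r⟩⟩
    · exact absurd rfl _h0
    · exact absurd ⟨rfl, not_le.mp _h2⟩ _h1
    · simp only [List.length_cons]; omega
  have h3 : (PySem.List.sorted s (fun x => x) false).length = t.length := rfl
  simp only [List.length_tail, List.length_append, List.length_cons, List.length_nil]
  omega

def solution2 (scoville : List Int) (k : Int) : Int :=
  solution2Loop scoville k 0

-- ===== PORT B =====
-- port of Source B's _insert_sorted: scan past the elements ≤ x, splice x in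
def insSorted (x : Int) (ys : List Int) : List Int :=
  ys.takeWhile (fun y => y ≤ x) ++ x :: ys.dropWhile (fun y => y ≤ x)

theorem length_insSorted (x : Int) (ys : List Int) :
    (insSorted x ys).length = ys.length + 1 := by
  unfold insSorted
  rw [List.length_append, List.length_cons]
  have := congrArg List.length (List.takeWhile_append_dropWhile (p := fun y => y ≤ x) (l := ys))
  rw [List.length_append] at this
  omega

-- Source B's while loop on the sorted list s
def solution2AltLoop (s : List Int) (k : Int) (count : Int) : Int :=
  match s with
  | [] => 0          -- Python raises IndexError on s[0] here (outside Pre_)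
  | a :: tail =>
    if a < k then
      match tail with
      | [] => -1
      | b :: rest => solution2AltLoop (insSorted (a + 2 * b) rest) k (count + 1)
    else count
termination_by s.length
decreasing_by simp [length_insSorted]

def solution2_alt (scoville : List Int) (k : Int) : Int :=
  solution2AltLoop (PySem.List.sorted scoville (fun x => x) false) k 0

-- ===== PRECONDITION & SPEC =====
-- Pre_ excludes only the empty list, on which both Pythons raise IndexError.
def Pre_solution2 (scoville : List Int) (_k : Int) : Prop := scoville ≠ []
instance (scoville : List Int) (k : Int) : Decidable (Pre_solution2 scoville k) := by
  unfold Pre_solution2; infer_instance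

def pvWitness_solution2 : List Int × Int := ([1, 2, 3, 9, 10, 12], 7)

def Spec_solution2 (scoville : List Int) (k : Int) (out : Int) : Prop := out = solution2_alt scoville k
instance (scoville : List Int) (k : Int) (out : Int) : Decidable (Spec_solution2 scoville k out) := by unfold Spec_solution2; infer_instance

-- ===== CLAIM (what is proved, stated in full; the proofs are below) =====
def Claim_equal_solution2 : Prop := ∀ (scoville : List Int) (k : Int), Dom_solution2 scoville k → Pre_solution2 scoville k → Spec_solution2 scoville k (solution2 scoville k)

-- ===== LEMMAS AND PROOFS =====

theorem insSorted_perm (x : Int) (ys : List Int) :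
    (insSorted x ys).Perm (ys ++ [x]) := by
  unfold insSorted
  conv_rhs => rw [← List.takeWhile_append_dropWhile (p := fun y => decide (y ≤ x)) (l := ys),
    List.append_assoc]
  exact List.Perm.append_left _ ((List.perm_append_singleton x _).symm)

theorem insSorted_pairwise (x : Int) (ys : List Int)
    (h : ys.Pairwise (· ≤ ·)) : (insSorted x ys).Pairwise (· ≤ ·) := by
  induction ys with
  | nil => simp [insSorted]
  | cons y ys ih =>
    rcases (List.pairwise_cons.mp h) with ⟨hy, hys⟩
    by_cases hyx : y ≤ x
    · have : insSorted x (y :: ys) = y :: insSorted x ys := by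
        simp [insSorted, List.takeWhile, List.dropWhile, hyx]
      rw [this, List.pairwise_cons]
      refine ⟨?_, ih hys⟩
      intro z hz
      have := (insSorted_perm x ys).mem_iff.mp hz
      rcases List.mem_append.mp this with h1 | h1
      · exact hy z h1
      · simp at h1; omega
    · have : insSorted x (y :: ys) = x :: y :: ys := by
        simp [insSorted, List.takeWhile, List.dropWhile, hyx]
      rw [this, List.pairwise_cons]
      refine ⟨?_, h⟩
      intro z hz
      rcases hz with _ | hz
      · omega
      · have := hy z (by assumption)
        omega

-- sorting (rest ++ [x]) when rest is already sorted is exactly Source B's ordered insert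
theorem sorted_append_singleton (x : Int) (rest : List Int)
    (h : rest.Pairwise (· ≤ ·)) :
    PySem.List.sorted (rest ++ [x]) (fun x => x) false = insSorted x rest :=
  PySem.List.sorted_id_eq_of_perm_of_pairwise (rest ++ [x]) (insSorted x rest)
    (insSorted_perm x rest) (insSorted_pairwise x rest h)

-- the main invariant: A's loop on any list = B's loop on its sorted form
theorem loop_eq (n : Nat) : ∀ (s : List Int) (k answer : Int), s.length ≤ n →
    solution2Loop s k answer
      = solution2AltLoop (PySem.List.sorted s (fun x => x) false) k answer := by
  induction n with
  | zero =>
    intro s k answer hn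
    have hs : s = [] := List.length_eq_zero_iff.mp (Nat.le_zero.mp hn)
    subst hs
    rw [solution2Loop]
    simp [PySem.List.sorted, solution2AltLoop]
  | succ n ih =>
    intro s k answer hn
    rw [solution2Loop]
    set t := PySem.List.sorted s (fun x => x) false with ht
    have hl : t.length = s.length := PySem.List.length_sorted s (fun x => x) false
    have hpw : t.Pairwise (· ≤ ·) := by
      simpa using PySem.List.sorted_pairwise s (fun x => x)
    rcases t with _ | ⟨a, _ | ⟨b, rest⟩⟩
    · simp [solution2AltLoop]
    · -- singleton
      simp only [solution2AltLoop]
      by_cases hak : a < k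
      · simp [PySem.List.pyGetD_zero_cons, hak]
      · simp [PySem.List.pyGetD_zero_cons, hak, not_lt.mp hak]
    · -- a :: b :: rest
      have hga : PySem.List.pyGetD (a :: b :: rest) 0 0 = a := PySem.List.pyGetD_zero_cons a _ 0
      have hgb : PySem.List.pyGetD (a :: b :: rest) 1 0 = b := by
        simp only [PySem.List.pyGetD, PySem.List.pyGet?, PySem.List.pyIdx?]
        norm_num
      by_cases hak : a < k
      · have hcond2 : ¬(PySem.List.pyGetD (a :: b :: rest) 0 0 ≥ k) := by
          rw [hga]; omega
        rw [dif_neg (by simp : ¬(a :: b :: rest) = []),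
          dif_neg (by simp : ¬((a :: b :: rest).length = 1 ∧ PySem.List.pyGetD (a :: b :: rest) 0 0 < k)),
          dif_neg hcond2, hga, hgb]
        have hstep : (((a :: b :: rest) ++ [a + b * 2]).tail).tail = rest ++ [a + b * 2] := rfl
        rw [hstep]
        have hlen : (rest ++ [a + b * 2]).length ≤ n := by
          have : (a :: b :: rest).length = s.length := hl
          simp only [List.length_cons] at this
          simp only [List.length_append, List.length_singleton]
          omega
        rw [ih _ k (answer + 1) hlen]
        have hrestpw : rest.Pairwise (· ≤ ·) :=
          ((List.pairwise_cons.mp (List.pairwise_cons.mp hpw).2).2)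
        rw [sorted_append_singleton _ _ hrestpw,
          (by ring : a + b * 2 = a + 2 * b)]
        conv_rhs => rw [solution2AltLoop.eq_def]
        simp [hak]
      · rw [dif_neg (by simp : ¬(a :: b :: rest) = []),
          dif_neg (by simp : ¬((a :: b :: rest).length = 1 ∧ PySem.List.pyGetD (a :: b :: rest) 0 0 < k)),
          dif_pos (by rw [hga]; omega : PySem.List.pyGetD (a :: b :: rest) 0 0 ≥ k)]
        rw [solution2AltLoop.eq_def]
        simp [hak]

-- ===== VERDICT (by name: the statement is the Claim_ definition above) =====
theorem solution2_spec : Claim_equal_solution2 := by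
  intro scoville k _hdom _hpre
  unfold Spec_solution2 solution2 solution2_alt
  exact loop_eq scoville.length scoville k 0 le_rfl
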